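-- pv_equiv track=rewrite | github.com/EgorCry/Deep_Learning_Playground | Решение задач с собеседований/Parking_Lots_Minimum_Cars_Numbers.py | min_cars_numbers_effective
-- ===== SOURCE A (Python) =====
-- def min_cars_numbers_effective(cars, n):
--     events = []
--     for i in range(len(cars)):
--         time_in, time_out, place_from, place_to = cars[i]
--         events.append((time_in - 1, 1, place_to - place_from + 1, i))
--         events.append((time_out, -1, place_to - place_from + 1, i))
--     events.sort()
--     occupied = 0
--     cur_cars = 0
--     min_cars = len(cars) + 1
--     for i in range(len(events)):
--         if events[i][1] == -1:
--             occupied -= events[i][2]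
--             cur_cars -= 1
--         elif events[i][1] == 1:
--             occupied += events[i][2]
--             cur_cars += 1
--         if occupied == n and cur_cars < min_cars:
--             min_cars = cur_cars
--     car_nums = set()
--     cur_cars = 0
--     for i in range(len(events)):
--         if events[i][1] == -1:
--             occupied -= events[i][2]
--             cur_cars -= 1
--             if events[i][3] in car_nums:
--                 car_nums.remove(events[i][3])
--         elif events[i][1] == 1:
--             occupied += events[i][2]
--             cur_cars += 1
--             car_nums.add(events[i][3])
--         if occupied == n and cur_cars == min_cars:
--             return car_nums
--     return set()
-- ===== SOURCE B (Python) =====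
-- def min_cars_numbers_effective(cars, n):
--     events = []
--     for i in range(len(cars)):
--         time_in, time_out, place_from, place_to = cars[i]
--         events.append((time_in - 1, 1, place_to - place_from + 1, i))
--         events.append((time_out, -1, place_to - place_from + 1, i))
--     events.sort()
--     occupied = 0
--     cur_cars = 0
--     car_nums = set()
--     best_min = len(cars) + 1
--     best_set = set()
--     for _, typ, size, idx in events:
--         if typ == -1:
--             occupied -= size
--             cur_cars -= 1
--             car_nums.discard(idx)
--         else:
--             occupied += size
--             cur_cars += 1
--             car_nums.add(idx)
--         if occupied == n and cur_cars < best_min: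
--             best_min = cur_cars
--             best_set = set(car_nums)
--     return best_set
-- ===== Notes on version B (the rewrite author's own statement) =====
-- stated objective: simpler
-- what changed: A sweeps the sorted events twice (one pass to find the minimum car count at full occupancy, then a rescan maintaining the id set to return the first matching snapshot); B does a single sweep that maintains the live id set and snapshots it whenever occupancy equals n and the car count strictly improves the running best.
import Mathlib
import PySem

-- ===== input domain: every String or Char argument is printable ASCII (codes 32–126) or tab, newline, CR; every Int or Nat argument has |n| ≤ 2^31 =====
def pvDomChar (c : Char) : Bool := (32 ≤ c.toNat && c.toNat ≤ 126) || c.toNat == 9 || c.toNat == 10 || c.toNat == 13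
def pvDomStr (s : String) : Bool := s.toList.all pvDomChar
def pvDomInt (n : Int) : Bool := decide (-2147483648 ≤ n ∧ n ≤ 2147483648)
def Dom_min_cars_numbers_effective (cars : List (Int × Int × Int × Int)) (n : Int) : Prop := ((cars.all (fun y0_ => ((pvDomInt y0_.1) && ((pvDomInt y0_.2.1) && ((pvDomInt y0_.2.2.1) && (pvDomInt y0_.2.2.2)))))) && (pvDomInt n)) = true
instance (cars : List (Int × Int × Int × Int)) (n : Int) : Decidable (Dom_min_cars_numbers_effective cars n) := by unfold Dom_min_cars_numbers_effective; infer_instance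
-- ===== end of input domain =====

-- B replaces A's two sweeps over the sorted events (min-finding pass, then a rescan for the
-- first minimal snapshot) by ONE sweep keeping a running best snapshot (objective: simpler).

-- ===== PORT A =====
-- event construction + sort: this source code is identical in both Pythons, so both ports share it
def pvMkEvents (cars : List (Int × Int × Int × Int)) : List (Int × Int × Int × Int) :=
  (PySem.List.enumerate cars).foldl (fun ev p =>
    ev ++ [(p.2.1 - 1, 1, p.2.2.2.2 - p.2.2.2.1 + 1, p.1),
           (p.2.2.1, -1, p.2.2.2.2 - p.2.2.2.1 + 1, p.1)]) []

-- Python's list.sort() on int 4-tuples (lexicographic) is ported as a stable sort by the last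
-- two components followed by a stable sort by the first two (radix argument): exact, because
-- PySem.List.sorted2 is stable and comparison of int pairs is total.
def pvSortEvents (es : List (Int × Int × Int × Int)) : List (Int × Int × Int × Int) :=
  PySem.List.sorted2 (PySem.List.sorted2 es (fun e => e.2.2.1) (fun e => e.2.2.2))
    (fun e => e.1) (fun e => e.2.1)

-- A's first loop: state (occupied, cur_cars, min_cars); returns final (occupied, min_cars)
def pvPass1 (n : Int) : List (Int × Int × Int × Int) → Int → Int → Int → Int × Int
  | [], occ, _, m => (occ, m)
  | e :: es, occ, cur, m =>
    let occ' := if e.2.1 = -1 then occ - e.2.2.1 else if e.2.1 = 1 then occ + e.2.2.1 else occ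
    let cur' := if e.2.1 = -1 then cur - 1 else if e.2.1 = 1 then cur + 1 else cur
    let m' := if occ' = n ∧ cur' < m then cur' else m
    pvPass1 n es occ' cur' m'

-- A's second loop: early return of car_nums at the first snapshot matching min_cars
def pvPass2 (n m : Int) : List (Int × Int × Int × Int) → Int → Int → PySem.Set Int → PySem.Set Int
  | [], _, _, _ => PySem.Set.ofList []
  | e :: es, occ, cur, s =>
    let occ' := if e.2.1 = -1 then occ - e.2.2.1 else if e.2.1 = 1 then occ + e.2.2.1 else occ
    let cur' := if e.2.1 = -1 then cur - 1 else if e.2.1 = 1 then cur + 1 else cur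
    let s' := if e.2.1 = -1 then
        (if PySem.Set.contains s e.2.2.2 then (PySem.Set.remove? s e.2.2.2).getD s else s)
      else if e.2.1 = 1 then PySem.Set.add s e.2.2.2 else s
    if occ' = n ∧ cur' = m then s' else pvPass2 n m es occ' cur' s'

def min_cars_numbers_effective (cars : List (Int × Int × Int × Int)) (n : Int) : List Int :=
  let events := pvSortEvents (pvMkEvents cars)
  let r := pvPass1 n events 0 0 ((cars.length : Int) + 1)
  pvPass2 n r.2 events r.1 0 PySem.Set.empty

-- ===== PORT B =====
-- B's single loop: state (occupied, cur_cars, car_nums, best_min, best_set)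
def pvBPass (n : Int) : List (Int × Int × Int × Int) → Int → Int → PySem.Set Int → Int → PySem.Set Int → PySem.Set Int
  | [], _, _, _, _, bs => bs
  | e :: es, occ, cur, s, bm, bs =>
    let occ' := if e.2.1 = -1 then occ - e.2.2.1 else occ + e.2.2.1
    let cur' := if e.2.1 = -1 then cur - 1 else cur + 1
    let s' := if e.2.1 = -1 then PySem.Set.discard s e.2.2.2 else PySem.Set.add s e.2.2.2
    if occ' = n ∧ cur' < bm then pvBPass n es occ' cur' s' cur' s'
    else pvBPass n es occ' cur' s' bm bs

def min_cars_numbers_effective_alt (cars : List (Int × Int × Int × Int)) (n : Int) : List Int :=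
  pvBPass n (pvSortEvents (pvMkEvents cars)) 0 0 PySem.Set.empty ((cars.length : Int) + 1) PySem.Set.empty

-- ===== PRECONDITION & SPEC =====
def Spec_min_cars_numbers_effective (cars : List (Int × Int × Int × Int)) (n : Int) (out : List Int) : Prop := out = min_cars_numbers_effective_alt cars n
instance (cars : List (Int × Int × Int × Int)) (n : Int) (out : List Int) : Decidable (Spec_min_cars_numbers_effective cars n out) := by unfold Spec_min_cars_numbers_effective; infer_instance

-- ===== CLAIM (what is proved, stated in full; the proofs are below) =====
def Claim_equal_min_cars_numbers_effective : Prop := ∀ (cars : List (Int × Int × Int × Int)) (n : Int), Dom_min_cars_numbers_effective cars n → Spec_min_cars_numbers_effective cars n (min_cars_numbers_effective cars n)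

-- ===== LEMMAS AND PROOFS =====

-- the sorted event list is a rearrangement of the built one
theorem pvSortEvents_perm (es : List (Int × Int × Int × Int)) : (pvSortEvents es).Perm es := by
  unfold pvSortEvents
  exact (PySem.List.sorted2_perm _ _ _ _).trans (PySem.List.sorted2_perm _ _ _ _)

-- the first pass's minimum never exceeds its initial value
theorem pvPass1_snd_le (n : Int) (es : List (Int × Int × Int × Int)) (occ cur m : Int) :
    (pvPass1 n es occ cur m).2 ≤ m := by
  induction es generalizing occ cur m with
  | nil => simp [pvPass1]
  | cons e es ih =>
    simp only [pvPass1]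
    split_ifs <;> exact le_trans (ih _ _ _) (by omega)

-- signed place-count of one event
def pvDelta (e : Int × Int × Int × Int) : Int :=
  if e.2.1 = -1 then -e.2.2.1 else if e.2.1 = 1 then e.2.2.1 else 0

theorem pvPass1_fst (n : Int) (es : List (Int × Int × Int × Int)) (occ cur m : Int) :
    (pvPass1 n es occ cur m).1 = occ + (es.map pvDelta).sum := by
  induction es generalizing occ cur m with
  | nil => simp [pvPass1]
  | cons e es ih =>
    simp only [pvPass1, List.map_cons, List.sum_cons]
    rw [ih]
    unfold pvDelta
    split_ifs <;> ring

theorem pvDelta_sum_sorted (cars : List (Int × Int × Int × Int)) :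
    ((pvSortEvents (pvMkEvents cars)).map pvDelta).sum = 0 := by
  rw [List.Perm.sum_eq ((pvSortEvents_perm _).map pvDelta)]
  unfold pvMkEvents
  rw [PySem.List.foldl_append_eq_flatMap]
  simp only [List.nil_append]
  induction PySem.List.enumerate cars 0 with
  | nil => simp
  | cons p l ih => simp [pvDelta, ih]

-- A's guarded remove equals B's discard
theorem pvRemove_eq_discard (s : PySem.Set Int) (x : Int) :
    (if PySem.Set.contains s x then (PySem.Set.remove? s x).getD s else s) = PySem.Set.discard s x := by
  by_cases hx : x ∈ s
  · simp [PySem.Set.contains, PySem.Set.remove?, PySem.Set.discard, hx]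
  · simp [PySem.Set.contains, PySem.Set.discard, hx]
    exact (List.filter_eq_self.mpr (fun a ha => by
      simp only [Bool.not_true, Bool.not_eq_eq_eq_not, beq_eq_false_iff_ne, ne_eq]
      intro h; exact hx (h ▸ ha))).symm

-- the core one-pass-vs-two-pass equivalence, generalized over the shared state
theorem pvB_eq_passes (n : Int) (es : List (Int × Int × Int × Int))
    (occ cur : Int) (s : PySem.Set Int) (bm : Int) (bs : PySem.Set Int)
    (hev : ∀ e ∈ es, e.2.1 = -1 ∨ e.2.1 = 1) :
    pvBPass n es occ cur s bm bs =
      (if (pvPass1 n es occ cur bm).2 < bm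
       then pvPass2 n (pvPass1 n es occ cur bm).2 es occ cur s
       else bs) := by
  induction es generalizing occ cur s bm bs with
  | nil => simp [pvBPass, pvPass1]
  | cons e es ih =>
    have he : e.2.1 = -1 ∨ e.2.1 = 1 := hev e (List.mem_cons_self ..)
    have hev' : ∀ x ∈ es, x.2.1 = -1 ∨ x.2.1 = 1 := fun x hx => hev x (List.mem_cons_of_mem _ hx)
    -- the two ports compute the same successor state
    have hocc : (if e.2.1 = -1 then occ - e.2.2.1 else occ + e.2.2.1)
        = (if e.2.1 = -1 then occ - e.2.2.1 else if e.2.1 = 1 then occ + e.2.2.1 else occ) := by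
      rcases he with h | h <;> simp [h]
    have hcur : (if e.2.1 = -1 then cur - 1 else cur + 1)
        = (if e.2.1 = -1 then cur - 1 else if e.2.1 = 1 then cur + 1 else cur) := by
      rcases he with h | h <;> simp [h]
    have hs : (if e.2.1 = -1 then PySem.Set.discard s e.2.2.2 else PySem.Set.add s e.2.2.2)
        = (if e.2.1 = -1 then
            (if PySem.Set.contains s e.2.2.2 then (PySem.Set.remove? s e.2.2.2).getD s else s)
          else if e.2.1 = 1 then PySem.Set.add s e.2.2.2 else s) := by
      rcases he with h | h
      · rw [if_pos h, if_pos h, pvRemove_eq_discard]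
      · have hne : e.2.1 ≠ -1 := by omega
        rw [if_neg hne, if_neg hne, if_pos h]
    set occ' := if e.2.1 = -1 then occ - e.2.2.1 else occ + e.2.2.1 with hocc'
    set cur' := if e.2.1 = -1 then cur - 1 else cur + 1 with hcur'
    set s' := if e.2.1 = -1 then PySem.Set.discard s e.2.2.2 else PySem.Set.add s e.2.2.2 with hs'
    simp only [pvBPass, pvPass1, pvPass2, ← hocc, ← hcur, ← hs, ← hocc', ← hcur', ← hs']
    by_cases hc : occ' = n ∧ cur' < bm
    · rw [if_pos hc, if_pos hc, ih occ' cur' s' cur' s' hev']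
      have hm := pvPass1_snd_le n es occ' cur' cur'
      by_cases himp : (pvPass1 n es occ' cur' cur').2 < cur'
      · rw [if_pos himp, if_pos (lt_trans himp hc.2),
          if_neg (by intro h; omega)]
      · have heq : (pvPass1 n es occ' cur' cur').2 = cur' := le_antisymm hm (not_lt.mp himp)
        rw [if_neg himp, heq, if_pos hc.2, if_pos ⟨hc.1, rfl⟩]
    · rw [if_neg hc, if_neg hc, ih occ' cur' s' bm bs hev']
      by_cases himp : (pvPass1 n es occ' cur' bm).2 < bm
      · rw [if_pos himp, if_pos himp, if_neg (by
          intro h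
          exact hc ⟨h.1, by omega⟩)]
      · rw [if_neg himp, if_neg himp]

theorem pvMkEvents_types (cars : List (Int × Int × Int × Int)) :
    ∀ e ∈ pvSortEvents (pvMkEvents cars), e.2.1 = -1 ∨ e.2.1 = 1 := by
  intro e he
  have he' : e ∈ pvMkEvents cars := (pvSortEvents_perm _).mem_iff.mp he
  unfold pvMkEvents at he'
  rw [PySem.List.foldl_append_eq_flatMap] at he'
  simp only [List.nil_append, List.mem_flatMap, List.mem_cons, List.not_mem_nil, or_false] at he'
  obtain ⟨p, _, hp⟩ := he'
  rcases hp with h | h <;> rw [h] <;> simp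

-- if cur_cars can never reach m (not enough arrival events remain), pass2 returns set()
theorem pvPass2_unreachable (n m : Int) (es : List (Int × Int × Int × Int))
    (occ cur : Int) (s : PySem.Set Int)
    (h : cur + (es.countP (fun e => decide (e.2.1 = 1)) : Int) < m) :
    pvPass2 n m es occ cur s = PySem.Set.ofList [] := by
  induction es generalizing occ cur s with
  | nil => simp [pvPass2]
  | cons e es ih =>
    rw [List.countP_cons] at h
    simp only [pvPass2]
    set cur' := if e.2.1 = -1 then cur - 1 else if e.2.1 = 1 then cur + 1 else cur with hcur'
    have hcur'le : cur' + (es.countP (fun e => decide (e.2.1 = 1)) : Int) < m := by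
      rw [hcur']
      by_cases h1 : e.2.1 = -1 <;> by_cases h2 : e.2.1 = 1 <;>
        simp only [h1, h2, if_pos, if_false, decide_true, decide_false] at h ⊢ <;>
        push_cast at h ⊢ <;> omega
    rw [if_neg (by
      intro hcnd
      have hnn : (0 : Int) ≤ (es.countP (fun e => decide (e.2.1 = 1)) : Int) := Int.natCast_nonneg _
      have := hcnd.2
      omega)]
    exact ih _ _ _ hcur'le

-- the sorted event list contains exactly cars.length arrival events
theorem pvCountOnes_sorted (cars : List (Int × Int × Int × Int)) :
    ((pvSortEvents (pvMkEvents cars)).countP (fun e => decide (e.2.1 = 1)) : Int)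
      = (cars.length : Int) := by
  rw [(pvSortEvents_perm _).countP_eq]
  unfold pvMkEvents
  rw [PySem.List.foldl_append_eq_flatMap]
  simp only [List.nil_append]
  have hnat : ∀ l : List (Int × (Int × Int × Int × Int)),
      (l.flatMap (fun p => [(p.2.1 - 1, 1, p.2.2.2.2 - p.2.2.2.1 + 1, p.1),
        (p.2.2.1, -1, p.2.2.2.2 - p.2.2.2.1 + 1, p.1)])).countP
        (fun e => decide (e.2.1 = 1)) = l.length := by
    intro l
    induction l with
    | nil => simp
    | cons p l ih => simp [ih]
  rw [hnat, PySem.List.length_enumerate]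

-- ===== VERDICT (by name: the statement is the Claim_ definition above) =====
theorem min_cars_numbers_effective_spec : Claim_equal_min_cars_numbers_effective := by
  intro cars n _
  unfold Spec_min_cars_numbers_effective min_cars_numbers_effective min_cars_numbers_effective_alt
  simp only
  rw [pvB_eq_passes n _ 0 0 PySem.Set.empty ((cars.length : Int) + 1) PySem.Set.empty
    (pvMkEvents_types cars)]
  have hocc : (pvPass1 n (pvSortEvents (pvMkEvents cars)) 0 0 ((cars.length : Int) + 1)).1 = 0 := by
    rw [pvPass1_fst, pvDelta_sum_sorted]; ring
  have hle := pvPass1_snd_le n (pvSortEvents (pvMkEvents cars)) 0 0 ((cars.length : Int) + 1)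
  have hcnt := pvCountOnes_sorted cars
  by_cases h : (pvPass1 n (pvSortEvents (pvMkEvents cars)) 0 0 ((cars.length : Int) + 1)).2
      < (cars.length : Int) + 1
  · rw [if_pos h, hocc]
  · rw [if_neg h, le_antisymm hle (not_lt.mp h),
      pvPass2_unreachable n _ _ _ _ _ (by omega)]
    rfl
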